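-- pv_equiv track=rewrite | github.com/pypi-data/pypi-mirror-385 | packages/pydruglogics/pydruglogics-0.1.10.tar.gz/pydruglogics-0.1.10/pydruglogics/utils/BNetworkUtil.py | to_bnet_format
-- ===== SOURCE A (Python) =====
-- def to_bnet_format(boolean_equations):
--     """
--     Converts Boolean equations to the '.bnet' format.
--     :param boolean_equations: Boolean equations to be converted.
--     :return: Boolean Equations in BNet format.
--     """
--     equation_list = []
--
--     for eq in boolean_equations:
--         target, activating_regulators, inhibitory_regulators, link = eq
--
--         target_value = f"{target}, "
--
--         activation_terms = [regulator for regulator, value in activating_regulators.items() if value == 1]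
--         if activation_terms:
--             activation_expression = f"({activation_terms[0]})"
--             for reg in activation_terms[1:]:
--                 activation_expression = f"({activation_expression} | {reg})"
--         else:
--             activation_expression = ''
--
--         inhibition_terms = [regulator for regulator, value in inhibitory_regulators.items() if value == 1]
--         if inhibition_terms:
--             inhibition_expression = f"({inhibition_terms[0]})"
--             for reg in inhibition_terms[1:]:
--                 inhibition_expression = f"({inhibition_expression} | {reg})"
--         else:
--             inhibition_expression = ''
--
--         if activation_expression and inhibition_expression:
--             combined_expression = f"{activation_expression} {link} !{inhibition_expression}"
--         elif activation_expression or inhibition_expression: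
--             combined_expression = activation_expression if activation_expression else f"!{inhibition_expression}"
--         else:
--             combined_expression = '0'
--
--         equation_line = f"{target_value}{combined_expression}".strip()
--         equation_list.append(equation_line)
--
--     final_equation_list = '\n'.join(equation_list)
--     return final_equation_list
-- ===== SOURCE B (Python) =====
-- def _or_chain(rev_terms):
--     # right-to-left recursion on the grammar: last term wraps the chain of the rest
--     head, rest = rev_terms[0], rev_terms[1:]
--     if not rest:
--         return f"({head})"
--     return f"({_or_chain(rest)} | {head})"
--
--
-- def to_bnet_format(boolean_equations):
--     lines = []
--     for target, activating_regulators, inhibitory_regulators, link in boolean_equations: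
--         clauses = []
--         acts = [r for r, v in activating_regulators.items() if v == 1]
--         if acts:
--             clauses.append(_or_chain(list(reversed(acts))))
--         inhs = [r for r, v in inhibitory_regulators.items() if v == 1]
--         if inhs:
--             clauses.append('!' + _or_chain(list(reversed(inhs))))
--         combined = f" {link} ".join(clauses) if clauses else '0'
--         lines.append(f"{target}, {combined}".strip())
--     return '\n'.join(lines)
-- ===== Notes on version B (the rewrite author's own statement) =====
-- stated objective: alternative
-- what changed: Each OR-expression is built by right-to-left recursion on the grammar (the last term wraps the chain of the remaining terms) instead of A's left fold that re-wraps the growing string, and A's four-way activation/inhibition branch ladder is replaced by joining a 0-, 1- or 2-element clause list with the link as separator.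
import Mathlib
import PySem

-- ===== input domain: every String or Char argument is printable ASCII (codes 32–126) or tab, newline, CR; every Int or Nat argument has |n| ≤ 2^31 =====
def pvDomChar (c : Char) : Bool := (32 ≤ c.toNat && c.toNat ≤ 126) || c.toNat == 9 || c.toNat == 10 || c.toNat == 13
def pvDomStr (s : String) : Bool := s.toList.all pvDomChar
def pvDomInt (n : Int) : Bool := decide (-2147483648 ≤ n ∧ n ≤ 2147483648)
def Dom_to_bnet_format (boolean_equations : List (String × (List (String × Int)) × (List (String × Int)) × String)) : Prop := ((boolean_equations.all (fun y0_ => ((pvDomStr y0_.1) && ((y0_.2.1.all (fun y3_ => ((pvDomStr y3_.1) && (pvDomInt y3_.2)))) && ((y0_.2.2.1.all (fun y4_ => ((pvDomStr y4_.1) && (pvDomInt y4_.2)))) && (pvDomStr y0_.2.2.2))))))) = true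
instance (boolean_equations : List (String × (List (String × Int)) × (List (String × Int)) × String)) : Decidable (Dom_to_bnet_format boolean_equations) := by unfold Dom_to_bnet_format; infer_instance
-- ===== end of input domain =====

-- B builds each OR-expression by right-to-left recursion on the grammar (last term wraps the chain of the rest) instead of A's left fold that re-wraps the growing string, and replaces A's four-way branch ladder by joining a 0/1/2-element clause list with the link separator.


-- ===== PORT A =====
-- the shared comprehension over dict.items(): [regulator for regulator, value in regs.items() if value == 1]
def pvTermsChars (regs : List (String × Int)) : List (List Char) :=
  (PySem.Dict.ofList regs).items.filterMap (fun p => if p.2 == 1 then some p.1.toList else none)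

-- A's expression: start "(t0)", then re-wrap the whole string for each further term
def pvAExpr (terms : List (List Char)) : List Char :=
  match terms with
  | [] => []
  | t :: rest =>
      rest.foldl (fun acc reg => ['('] ++ acc ++ [' ', '|', ' '] ++ reg ++ [')'])
        (['('] ++ t ++ [')'])

def pvALine (eq : String × (List (String × Int)) × (List (String × Int)) × String) : List Char :=
  let act := pvAExpr (pvTermsChars eq.2.1)
  let inh := pvAExpr (pvTermsChars eq.2.2.1)
  let combined :=
    if !act.isEmpty && !inh.isEmpty then
      act ++ [' '] ++ eq.2.2.2.toList ++ [' ', '!'] ++ inh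
    else if !act.isEmpty || !inh.isEmpty then
      (if !act.isEmpty then act else ['!'] ++ inh)
    else ['0']
  PySem.Chars.strip (eq.1.toList ++ [',', ' '] ++ combined)

def to_bnet_format (boolean_equations : List (String × (List (String × Int)) × (List (String × Int)) × String)) : String :=
  String.ofList (PySem.Chars.join ['\n']
    (boolean_equations.foldl (fun acc eq => acc ++ [pvALine eq]) []))

-- ===== PORT B =====
-- B's expression: recursion on the REVERSED term list — the head (last term) wraps the chain of the rest
def pvOrChain : List (List Char) → List Char
  | [] => []  -- unreachable: B only calls this on a nonempty list
  | t :: rest =>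
      if rest.isEmpty then ['('] ++ t ++ [')']
      else ['('] ++ pvOrChain rest ++ [' ', '|', ' '] ++ t ++ [')']

def pvBLine (eq : String × (List (String × Int)) × (List (String × Int)) × String) : List Char :=
  let acts := pvTermsChars eq.2.1
  let inhs := pvTermsChars eq.2.2.1
  let clauses :=
    (if acts.isEmpty then [] else [pvOrChain acts.reverse])
      ++ (if inhs.isEmpty then [] else [['!'] ++ pvOrChain inhs.reverse])
  let combined :=
    if clauses.isEmpty then ['0']
    else PySem.Chars.join ([' '] ++ eq.2.2.2.toList ++ [' ']) clauses
  PySem.Chars.strip (eq.1.toList ++ [',', ' '] ++ combined)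

def to_bnet_format_alt (boolean_equations : List (String × (List (String × Int)) × (List (String × Int)) × String)) : String :=
  String.ofList (PySem.Chars.join ['\n'] (boolean_equations.map pvBLine))

-- ===== PRECONDITION & SPEC =====
def Spec_to_bnet_format (boolean_equations : List (String × (List (String × Int)) × (List (String × Int)) × String)) (out : String) : Prop := out = to_bnet_format_alt boolean_equations
instance (boolean_equations : List (String × (List (String × Int)) × (List (String × Int)) × String)) (out : String) : Decidable (Spec_to_bnet_format boolean_equations out) := by unfold Spec_to_bnet_format; infer_instance

-- ===== CLAIM (what is proved, stated in full; the proofs are below) =====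
def Claim_equal_to_bnet_format : Prop := ∀ (boolean_equations : List (String × (List (String × Int)) × (List (String × Int)) × String)), Dom_to_bnet_format boolean_equations → Spec_to_bnet_format boolean_equations (to_bnet_format boolean_equations)

-- ===== LEMMAS AND PROOFS =====

-- B's backward recursion unrolled against A's forward fold
theorem pvOrChain_append (l : List (List Char)) (t0 : List Char) :
    pvOrChain (l ++ [t0])
      = l.reverse.foldl (fun acc reg => ['('] ++ acc ++ [' ', '|', ' '] ++ reg ++ [')'])
          (['('] ++ t0 ++ [')']) := by
  induction l with
  | nil => simp [pvOrChain]
  | cons r rs ih =>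
      have hne : (rs ++ [t0]).isEmpty = false := by simp
      simp [pvOrChain, hne, ih]

theorem pvExpr_eq (terms : List (List Char)) :
    pvAExpr terms = if terms.isEmpty then [] else pvOrChain terms.reverse := by
  cases terms with
  | nil => rfl
  | cons t rest =>
      simp [pvAExpr, List.reverse_cons, pvOrChain_append]

theorem pvOrChain_ne_nil (x : List Char) (xs : List (List Char)) :
    pvOrChain (x :: xs) ≠ [] := by
  cases xs <;> simp [pvOrChain]

theorem pvOrChain_reverse_ne_nil (ts : List (List Char)) (h : ts.isEmpty = false) :
    pvOrChain ts.reverse ≠ [] := by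
  cases hr : ts.reverse with
  | nil => simp [List.reverse_eq_nil_iff] at hr; simp [hr] at h
  | cons y ys => exact pvOrChain_ne_nil y ys

theorem pvLine_eq (eq : String × (List (String × Int)) × (List (String × Int)) × String) :
    pvALine eq = pvBLine eq := by
  simp only [pvALine, pvBLine, pvExpr_eq]
  cases ha : (pvTermsChars eq.2.1).isEmpty <;>
    cases hi : (pvTermsChars eq.2.2.1).isEmpty
  · simp [pvOrChain_reverse_ne_nil _ ha, pvOrChain_reverse_ne_nil _ hi, PySem.Chars.join,
      List.intercalate, List.intersperse]
  · simp [pvOrChain_reverse_ne_nil _ ha, PySem.Chars.join, List.intercalate]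
  · simp [pvOrChain_reverse_ne_nil _ hi, PySem.Chars.join, List.intercalate]
  · simp

-- ===== VERDICT (by name: the statement is the Claim_ definition above) =====
theorem to_bnet_format_spec : Claim_equal_to_bnet_format := by
  intro eqs _
  unfold Spec_to_bnet_format to_bnet_format to_bnet_format_alt
  rw [PySem.List.foldl_append_singleton_eq_map,
    List.map_congr_left (fun e _ => pvLine_eq e), List.nil_append]
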